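-- pv_equiv track=rewrite | github.com/btpay-org/btpay | btpay/updater/zip_updater.py | _detect_prefix
-- ===== SOURCE A (Python) =====
-- def _detect_prefix(names):
--     '''Detect a common directory prefix shared by all zip entries.'''
--     if not names:
--         return ''
--     # Check if all entries start with the same top-level directory
--     tops = set()
--     for name in names:
--         parts = name.split('/')
--         if len(parts) > 1:
--             tops.add(parts[0])
--         else:
--             return ''  # Has root-level files, no common prefix
--     if len(tops) == 1:
--         return tops.pop() + '/'
--     return ''
-- ===== SOURCE B (Python) =====
-- def _detect_prefix(names):
--     '''Detect a common directory prefix shared by all zip entries.'''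
--     if not names:
--         return ''
--     candidate = names[0].split('/')[0] + '/'
--     return candidate if all(name.startswith(candidate) for name in names) else ''
-- ===== Notes on version B (the rewrite author's own statement) =====
-- stated objective: simpler
-- what changed: B derives one candidate prefix (first entry's top-level directory plus '/') and verifies every name with startswith, instead of accumulating a set of top-level components and counting distinct ones; the trailing '/' makes root-level files fail the check.
import Mathlib
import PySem

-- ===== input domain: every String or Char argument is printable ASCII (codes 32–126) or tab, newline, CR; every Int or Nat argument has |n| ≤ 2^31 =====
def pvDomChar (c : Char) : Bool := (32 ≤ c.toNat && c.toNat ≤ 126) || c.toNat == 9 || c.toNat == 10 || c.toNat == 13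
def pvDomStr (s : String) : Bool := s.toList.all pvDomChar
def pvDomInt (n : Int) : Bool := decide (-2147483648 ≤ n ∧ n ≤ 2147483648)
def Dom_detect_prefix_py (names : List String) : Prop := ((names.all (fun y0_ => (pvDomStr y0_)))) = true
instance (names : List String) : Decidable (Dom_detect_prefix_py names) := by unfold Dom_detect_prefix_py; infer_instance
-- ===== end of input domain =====

-- B replaces A's set of top-level components (count the distinct ones) by a single
-- candidate prefix taken from the first entry, checked against every name with startswith.

-- ===== PORT A =====
-- the for-loop of A: accumulate the set `tops`; `none` = the early `return ''`
-- (name.split('/') is PySem.Chars.splitOn on the code points; the separator is the nonempty literal "/")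
def detectLoopA : List String → PySem.Set (List Char) → Option (PySem.Set (List Char))
  | [], tops => some tops
  | name :: rest, tops =>
      let parts := PySem.Chars.splitOn name.toList ['/']
      if 1 < parts.length then detectLoopA rest (PySem.Set.add tops (parts.headD []))
      else none

def detect_prefix_py (names : List String) : String :=
  if names = [] then ""
  else
    match detectLoopA names PySem.Set.empty with
    | none => ""                                   -- `return ''` inside the loop (root-level file)
    | some tops =>
        if PySem.Set.len tops = 1 then String.ofList (tops.headD []) ++ "/"  -- tops.pop() on a 1-element set
        else ""

-- ===== PORT B =====
def detect_prefix_py_alt (names : List String) : String :=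
  match names with
  | [] => ""
  | n0 :: _ =>
      let candidate := String.ofList ((PySem.Chars.splitOn n0.toList ['/']).headD []) ++ "/"
      if names.all (fun name => PySem.Str.startswith name candidate) then candidate else ""

-- ===== PRECONDITION & SPEC =====
def Spec_detect_prefix_py (names : List String) (out : String) : Prop := out = detect_prefix_py_alt names
instance (names : List String) (out : String) : Decidable (Spec_detect_prefix_py names out) := by unfold Spec_detect_prefix_py; infer_instance

-- ===== CLAIM (what is proved, stated in full; the proofs are below) =====
def Claim_equal_detect_prefix_py : Prop := ∀ (names : List String), Dom_detect_prefix_py names → Spec_detect_prefix_py names (detect_prefix_py names)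

-- ===== LEMMAS AND PROOFS =====

-- simple recursive model of s.split('/')
def splitSlash : List Char → List (List Char)
  | [] => [[]]
  | c :: rest =>
      if c = '/' then [] :: splitSlash rest
      else
        match splitSlash rest with
        | [] => [[c]]
        | h :: t => (c :: h) :: t

theorem splitSlash_ne_nil (s : List Char) : splitSlash s ≠ [] := by
  cases s with
  | nil => simp [splitSlash]
  | cons c rest =>
      simp only [splitSlash]
      split_ifs
      · simp
      · cases h : splitSlash rest <;> simp

-- prepend to the head of a (nonempty) list
def consHead (p : List Char) : List (List Char) → List (List Char)
  | [] => [p]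
  | h :: t => (p ++ h) :: t

theorem splitOn_go_eq (l : List Char) : ∀ (fuel : Nat) (cur : List Char) (acc : List (List Char)),
    l.length ≤ fuel →
    PySem.Chars.splitOn.go ['/'] fuel l cur acc = acc.reverse ++ consHead cur.reverse (splitSlash l) := by
  induction l with
  | nil =>
      intro fuel cur acc _
      cases fuel <;> simp [PySem.Chars.splitOn.go, splitSlash, consHead]
  | cons c rest ih =>
      intro fuel cur acc hf
      cases fuel with
      | zero => simp at hf
      | succ f =>
          simp only [List.length_cons, Nat.succ_le_succ_iff] at hf
          by_cases hc : c = '/'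
          · subst hc
            simp only [PySem.Chars.splitOn.go, List.isPrefixOf, beq_self_eq_true, Bool.true_and,
              if_true, List.length_singleton, List.drop_succ_cons,
              List.drop_zero, splitSlash, if_true]
            rw [ih f [] (cur.reverse :: acc) hf]
            cases h : splitSlash rest with
            | nil => exact absurd h (splitSlash_ne_nil rest)
            | cons h' t => simp [consHead]
          · have hpre : List.isPrefixOf ['/'] (c :: rest) = false := by
              simp [List.isPrefixOf]
              intro h; exact absurd h.symm hc
            simp only [PySem.Chars.splitOn.go, hpre, if_neg, Bool.false_eq_true, not_false_iff]
            rw [ih f (c :: cur) acc hf]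
            simp only [splitSlash, if_neg hc, List.reverse_cons]
            cases h : splitSlash rest with
            | nil => exact absurd h (splitSlash_ne_nil rest)
            | cons h' t => simp [consHead]

theorem splitOn_eq_splitSlash (s : List Char) :
    PySem.Chars.splitOn s ['/'] = splitSlash s := by
  rw [PySem.Chars.splitOn, splitOn_go_eq s (s.length + 1) [] [] (Nat.le_succ _)]
  cases h : splitSlash s with
  | nil => exact absurd h (splitSlash_ne_nil s)
  | cons h' t => simp [consHead]

theorem splitSlash_head (s : List Char) :
    (splitSlash s).headD [] = s.takeWhile (· ≠ '/') := by
  induction s with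
  | nil => simp [splitSlash]
  | cons c rest ih =>
      by_cases hc : c = '/'
      · subst hc; simp [splitSlash, List.takeWhile]
      · simp only [splitSlash, if_neg hc, List.takeWhile]
        cases h : splitSlash rest with
        | nil => exact absurd h (splitSlash_ne_nil rest)
        | cons h' t =>
            simp only [h, List.headD_cons] at ih
            simp [hc, ih]

theorem splitSlash_length (s : List Char) :
    1 < (splitSlash s).length ↔ '/' ∈ s := by
  induction s with
  | nil => simp [splitSlash]
  | cons c rest ih =>
      by_cases hc : c = '/'
      · subst hc
        have := splitSlash_ne_nil rest
        constructor
        · intro _; simp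
        · intro _
          simp only [splitSlash, if_true, List.length_cons]
          cases h : splitSlash rest with
          | nil => exact absurd h this
          | cons h' t => simp
      · simp only [splitSlash, if_neg hc]
        cases h : splitSlash rest with
        | nil => exact absurd h (splitSlash_ne_nil rest)
        | cons h' t =>
            rw [h] at ih
            simp only [List.length_cons] at ih ⊢
            rw [List.mem_cons]
            constructor
            · intro hl; exact Or.inr (ih.mp hl)
            · rintro (h1 | h2)
              · exact absurd h1.symm hc
              · exact ih.mpr h2

theorem slash_not_mem_takeWhile (s : List Char) : '/' ∉ s.takeWhile (· ≠ '/') := by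
  intro h
  have := List.mem_takeWhile_imp h
  simp at this

-- (t ++ ['/']) is a prefix of s  ↔  s contains '/' and s's part before the first '/' is t
theorem prefix_slash_iff (t s : List Char) (ht : '/' ∉ t) :
    (t ++ ['/']) <+: s ↔ ('/' ∈ s ∧ s.takeWhile (· ≠ '/') = t) := by
  induction t generalizing s with
  | nil =>
      cases s with
      | nil => simp
      | cons c rest =>
          by_cases hc : c = '/'
          · subst hc; simp [List.takeWhile]
          · simp [List.takeWhile, hc, List.cons_prefix_cons]
            intro h; exact absurd h.symm hc
  | cons a t' ih =>
      have ha : a ≠ '/' := fun h => ht (h ▸ List.mem_cons_self)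
      have ht' : '/' ∉ t' := fun h => ht (List.mem_cons_of_mem _ h)
      cases s with
      | nil => simp
      | cons c rest =>
          simp only [List.cons_append, List.cons_prefix_cons, List.mem_cons, List.takeWhile]
          constructor
          · rintro ⟨rfl, hp⟩
            obtain ⟨h1, h2⟩ := (ih rest ht').mp hp
            refine ⟨Or.inr h1, ?_⟩
            simp only [ne_eq, decide_not] at h2 ⊢
            simp [ha, h2]
          · rintro ⟨hm, hw⟩
            by_cases hc : c = '/'
            · subst hc; simp at hw
            · have hw' : c :: rest.takeWhile (· ≠ '/') = a :: t' := by
                simpa [hc] using hw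
              have hcr : '/' ∈ rest := by
                rcases hm with h1 | h2
                · exact absurd h1.symm hc
                · exact h2
              obtain ⟨rfl, hw2⟩ := List.cons.inj hw'
              exact ⟨rfl, (ih rest ht').mpr ⟨hcr, hw2⟩⟩

-- the top-level component of a name
def topOf (n : String) : List Char := n.toList.takeWhile (· ≠ '/')

-- PySem.Set.add only appends: foldl add extends the list on the right
theorem foldl_add_extends {α : Type} [BEq α] (l : List α) :
    ∀ (s : List α), ∃ t, l.foldl PySem.Set.add s = s ++ t := by
  induction l with
  | nil => intro s; exact ⟨[], by simp⟩
  | cons x l' ih =>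
      intro s
      obtain ⟨t, ht⟩ := ih (PySem.Set.add s x)
      simp only [List.foldl_cons, ht]
      unfold PySem.Set.add
      split_ifs with h
      · exact ⟨t, rfl⟩
      · exact ⟨x :: t, by simp⟩

theorem foldl_add_singleton {α : Type} [BEq α] [LawfulBEq α] (x : α) (l : List α) :
    l.foldl PySem.Set.add [x] = [x] ↔ ∀ y ∈ l, y = x := by
  induction l with
  | nil => simp
  | cons z l' ih =>
      simp only [List.foldl_cons, List.mem_cons]
      constructor
      · intro h
        have hz : z = x := by
          by_contra hzx
          have : PySem.Set.add [x] z = [x, z] := by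
            unfold PySem.Set.add PySem.Set.contains
            simp [hzx]
          rw [this] at h
          obtain ⟨t, ht⟩ := foldl_add_extends l' [x, z]
          rw [ht] at h
          simp at h
        subst hz
        have hadd : PySem.Set.add [z] z = [z] := by
          unfold PySem.Set.add PySem.Set.contains
          simp
        rw [hadd] at h
        intro y hy
        rcases hy with rfl | hy'
        · rfl
        · exact ih.mp h y hy'
      · intro h
        have hz : z = x := h z (Or.inl rfl)
        subst hz
        have hadd : PySem.Set.add [z] z = [z] := by
          unfold PySem.Set.add PySem.Set.contains
          simp
        rw [hadd]
        exact ih.mpr (fun y hy => h y (Or.inr hy))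

-- characterisation of A's loop
theorem detectLoopA_eq (names : List String) : ∀ (tops : PySem.Set (List Char)),
    detectLoopA names tops =
      if names.all (fun n => n.toList.contains '/')
      then some ((names.map topOf).foldl PySem.Set.add tops)
      else none := by
  induction names with
  | nil => intro tops; simp [detectLoopA]
  | cons n rest ih =>
      intro tops
      simp only [detectLoopA, splitOn_eq_splitSlash, List.all_cons, List.map_cons, List.foldl_cons]
      by_cases hn : '/' ∈ n.toList
      · rw [if_pos ((splitSlash_length n.toList).mpr hn)]
        rw [ih (PySem.Set.add tops ((splitSlash n.toList).headD []))]
        rw [splitSlash_head]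
        have : n.toList.contains '/' = true := by simpa using hn
        simp [this, topOf, hn]
      · have h1 : ¬ 1 < (splitSlash n.toList).length := fun h => hn ((splitSlash_length n.toList).mp h)
        rw [if_neg h1]
        have : n.toList.contains '/' = false := by simpa using hn
        simp only [this, Bool.false_and, Bool.false_eq_true, if_false]

-- B's startswith test, restated via topOf
theorem startswith_candidate_iff (n : String) (c0 : List Char) (hc0 : '/' ∉ c0) :
    PySem.Str.startswith n (String.ofList c0 ++ "/") = true ↔ ('/' ∈ n.toList ∧ topOf n = c0) := by
  have htl : (String.ofList c0 ++ "/").toList = c0 ++ ['/'] := by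
    rw [String.toList_append, String.toList_ofList]
    rfl
  rw [PySem.Str.startswith, htl, PySem.Chars.startswith_iff]
  exact prefix_slash_iff c0 n.toList hc0

-- ===== VERDICT (by name: the statement is the Claim_ definition above) =====
theorem detect_prefix_py_spec : Claim_equal_detect_prefix_py := by
  intro names _
  unfold Spec_detect_prefix_py detect_prefix_py detect_prefix_py_alt
  cases names with
  | nil => simp
  | cons n0 rest =>
      simp only [if_neg (List.cons_ne_nil n0 rest)]
      rw [detectLoopA_eq]
      set c0 := topOf n0 with hc0def
      have hhead : (PySem.Chars.splitOn n0.toList ['/']).headD [] = c0 := by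
        rw [splitOn_eq_splitSlash, splitSlash_head]
        exact hc0def.symm
      have hc0slash : '/' ∉ c0 := slash_not_mem_takeWhile n0.toList
      have hsw : ∀ n : String,
          PySem.Str.startswith n (String.ofList ((PySem.Chars.splitOn n0.toList ['/']).headD []) ++ "/") = true
            ↔ ('/' ∈ n.toList ∧ topOf n = c0) := by
        intro n
        rw [hhead]
        exact startswith_candidate_iff n c0 hc0slash
      by_cases hall : ((n0 :: rest).all (fun n => n.toList.contains '/')) = true
      · rw [if_pos hall]
        simp only [List.all_eq_true] at hall
        -- tops = foldl add ∅ over the tops; its head is c0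
        have hn0 : topOf n0 = c0 := rfl
        simp only [List.map_cons, List.foldl_cons]
        have hadd0 : PySem.Set.add PySem.Set.empty c0 = [c0] := by
          unfold PySem.Set.add PySem.Set.contains PySem.Set.empty
          simp
        rw [hn0, hadd0]
        obtain ⟨t, ht⟩ := foldl_add_extends (rest.map topOf) [c0]
        by_cases hlen : PySem.Set.len ((rest.map topOf).foldl PySem.Set.add [c0]) = 1
        · -- a single top: A returns c0 ++ "/", B's all-check succeeds
          rw [if_pos hlen]
          have hone : (rest.map topOf).foldl PySem.Set.add [c0] = [c0] := by
            rw [ht] at hlen ⊢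
            unfold PySem.Set.len at hlen
            simp at hlen
            simp [hlen]
          have halltop : ∀ y ∈ rest.map topOf, y = c0 := (foldl_add_singleton c0 _).mp hone
          have hballB : ((n0 :: rest).all
              (fun n => PySem.Str.startswith n (String.ofList ((PySem.Chars.splitOn n0.toList ['/']).headD []) ++ "/"))) = true := by
            simp only [List.all_eq_true]
            intro n hn
            rw [hsw n]
            refine ⟨by simpa using hall n hn, ?_⟩
            cases hn with
            | head => exact hn0
            | tail _ hn' => exact halltop (topOf n) (List.mem_map_of_mem hn')
          rw [if_pos hballB, hone]
          simp only [List.headD_cons]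
          rw [hhead]
        · rw [if_neg hlen]
          -- more than one top: some name's top differs from c0, B's all-check fails
          have hne : ¬ ∀ y ∈ rest.map topOf, y = c0 := by
            intro hy
            apply hlen
            rw [(foldl_add_singleton c0 _).mpr hy]
            rfl
          have : ¬ ((n0 :: rest).all
              (fun n => PySem.Str.startswith n (String.ofList ((PySem.Chars.splitOn n0.toList ['/']).headD []) ++ "/"))) = true := by
            intro hB
            apply hne
            intro y hy
            obtain ⟨n, hn, rfl⟩ := List.mem_map.mp hy
            simp only [List.all_eq_true] at hB
            exact ((hsw n).mp (hB n (List.mem_cons_of_mem _ hn))).2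
          rw [if_neg this]
      · rw [if_neg hall]
        -- some name has no '/': B's startswith fails for it
        have : ¬ ((n0 :: rest).all
            (fun n => PySem.Str.startswith n (String.ofList ((PySem.Chars.splitOn n0.toList ['/']).headD []) ++ "/"))) = true := by
          intro hB
          apply hall
          simp only [List.all_eq_true] at hB ⊢
          intro n hn
          simpa using ((hsw n).mp (hB n hn)).1
        rw [if_neg this]
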